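-- pv_equiv track=rewrite | github.com/pypi-data/pypi-mirror-284 | packages/gros-gatherer/gros_gatherer-1.0.0.tar.gz/gros_gatherer-1.0.0/gatherer/git/repo.py | _format_replaced_path
-- ===== SOURCE A (Python) =====
-- def _format_replaced_path(old_path: str, new_path: str) -> str:
--     # Algorithm comparable to pprint_rename function as implemented in git
--     # to format a path with partial replacement (move). See git's diff.c.
--     # Not implemented: C-style quoted files with non-unicode characters.
--
--     # Find common prefix
--     prefix_length = 0
--     for index, pair in enumerate(zip(old_path, new_path)):
--         if pair[0] != pair[1]:
--             break
--         if pair[0] == '/':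
--             prefix_length = index + 1
--
--     # Find common suffix
--     suffix_length = 0
--     prefix_adjust_for_slash = 1 if prefix_length else 0
--     old_index = len(old_path) - 1
--     new_index = len(new_path) - 1
--     while prefix_length - prefix_adjust_for_slash <= old_index and \
--             prefix_length - prefix_adjust_for_slash <= new_index and \
--             old_path[old_index] == new_path[new_index]:
--         if old_path[old_index] == '/':
--             suffix_length = len(old_path) - old_index
--
--         old_index -= 1
--         new_index -= 1
--
--     # Format replaced path
--     old_midlen = max(0, len(old_path) - suffix_length)
--     new_midlen = max(0, len(new_path) - suffix_length)
--
--     mid_name = (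
--         f'{old_path[prefix_length:old_midlen]} => '
--         f'{new_path[prefix_length:new_midlen]}'
--     )
--     if prefix_length + suffix_length > 0:
--         return (
--             f'{old_path[:prefix_length]}{{{mid_name}}}'
--             f'{old_path[len(old_path)-suffix_length:]}'
--         )
--
--     return mid_name
-- ===== SOURCE B (Python) =====
-- def _common_prefix_len(first, second):
--     index = 0
--     while index < len(first) and index < len(second) and first[index] == second[index]:
--         index += 1
--     return index
--
-- def _format_replaced_path(old_path: str, new_path: str) -> str:
--     # Common prefix: last '/' within the longest common prefix of the paths.
--     common = old_path[:_common_prefix_len(old_path, new_path)]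
--     prefix_length = common.rfind('/') + 1
--     bound = prefix_length - 1 if prefix_length else 0
--     # Common suffix: last '/' within the usable common suffix (via reversal).
--     reversed_old = old_path[::-1]
--     reversed_new = new_path[::-1]
--     usable = min(_common_prefix_len(reversed_old, reversed_new),
--                  len(old_path) - bound, len(new_path) - bound)
--     suffix_length = reversed_old[:usable].rfind('/') + 1
--
--     old_midlen = len(old_path) - suffix_length
--     new_midlen = len(new_path) - suffix_length
--     mid_name = (
--         f'{old_path[prefix_length:old_midlen]} => '
--         f'{new_path[prefix_length:new_midlen]}'
--     )
--     if prefix_length + suffix_length > 0: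
--         return (
--             f'{old_path[:prefix_length]}{{{mid_name}}}'
--             f'{old_path[len(old_path)-suffix_length:]}'
--         )
--     return mid_name
-- ===== Notes on version B (the rewrite author's own statement) =====
-- stated objective: alternative
-- what changed: Replaces A's two stateful index-walking loops (an enumerate/zip break loop tracking the last slash, and a while loop walking two indices backwards) by closed-form string operations: common-prefix length of the paths and of their reversals, rfind('/') on the relevant slice, and a min() for the overlap cap.
import Mathlib
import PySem

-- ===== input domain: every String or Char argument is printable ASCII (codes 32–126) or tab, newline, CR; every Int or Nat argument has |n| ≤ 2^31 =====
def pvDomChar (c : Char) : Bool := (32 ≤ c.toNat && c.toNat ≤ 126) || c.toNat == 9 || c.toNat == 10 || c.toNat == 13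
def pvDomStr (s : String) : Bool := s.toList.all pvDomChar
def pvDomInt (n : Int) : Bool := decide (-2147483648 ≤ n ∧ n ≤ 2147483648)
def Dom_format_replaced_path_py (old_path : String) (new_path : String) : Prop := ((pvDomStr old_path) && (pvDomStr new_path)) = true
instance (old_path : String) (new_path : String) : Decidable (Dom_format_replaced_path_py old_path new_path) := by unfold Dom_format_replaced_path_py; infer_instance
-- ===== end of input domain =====

-- B replaces A's two stateful index-walking loops by closed-form string operations:
-- common-prefix lengths of the paths (and of their reversals) plus rfind('/'); the
-- objective is an alternative, more idiomatic decomposition (same cost, no speed claim).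


-- shared formatting tail (textually identical in Source A and Source B): builds
-- '<old mid> => <new mid>' and wraps it in prefix{…}suffix when either is nonempty
def pvFmt (o n : List Char) (pre suf : Nat) : String :=
  let oldMid := o.length - suf   -- = max 0 (len - suf); suf ≤ len on every reachable call
  let newMid := n.length - suf
  let mid := String.ofList ((o.take oldMid).drop pre) ++ " => " ++ String.ofList ((n.take newMid).drop pre)
  if pre + suf > 0 then
    String.ofList (o.take pre) ++ "{" ++ mid ++ "}" ++ String.ofList (o.drop (o.length - suf))
  else mid

-- ===== PORT A =====
-- A's prefix loop: enumerate(zip(...)), break at first mismatch, remember last '/'+1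
def prefLoopA : List Char → List Char → Nat → Nat → Nat
  | a::as, b::bs, i, acc =>
    if a ≠ b then acc
    else prefLoopA as bs (i+1) (if a = '/' then i+1 else acc)
  | _, _, _, acc => acc

-- A's suffix while-loop; argument oi+1 encodes old_index = oi (0 encodes old_index = -1)
def sufLoopA (o n : List Char) (bound : Nat) : Nat → Nat → Nat → Nat
  | oi+1, ni+1, s =>
    if bound ≤ oi ∧ bound ≤ ni ∧ o.getD oi ' ' = n.getD ni ' ' then
      sufLoopA o n bound oi ni (if o.getD oi ' ' = '/' then o.length - oi else s)
    else s
  | _, _, s => s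

def format_replaced_path_py (old_path : String) (new_path : String) : String :=
  let o := old_path.toList
  let n := new_path.toList
  let pre := prefLoopA o n 0 0
  let adjust := if pre ≠ 0 then 1 else 0
  let suf := sufLoopA o n (pre - adjust) o.length n.length 0
  pvFmt o n pre suf

-- ===== PORT B =====
-- Source B's _common_prefix_len
def cplB : List Char → List Char → Nat
  | a::as, b::bs => if a = b then cplB as bs + 1 else 0
  | _, _ => 0

-- port of str.rfind('/'): index of the last '/', -1 if absent
def rfindSlashB : List Char → Int
  | [] => -1
  | a::as =>
    let r := rfindSlashB as
    if r ≥ 0 then r + 1 else if a = '/' then 0 else -1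

def format_replaced_path_py_alt (old_path : String) (new_path : String) : String :=
  let o := old_path.toList
  let n := new_path.toList
  let common := o.take (cplB o n)
  let pre := (rfindSlashB common + 1).toNat
  let bound := if pre ≠ 0 then pre - 1 else 0
  let ro := o.reverse
  let rn := n.reverse
  let usable := min (cplB ro rn) (min (o.length - bound) (n.length - bound))
  let suf := (rfindSlashB (ro.take usable) + 1).toNat
  pvFmt o n pre suf

-- ===== PRECONDITION & SPEC =====
def Spec_format_replaced_path_py (old_path : String) (new_path : String) (out : String) : Prop := out = format_replaced_path_py_alt old_path new_path
instance (old_path : String) (new_path : String) (out : String) : Decidable (Spec_format_replaced_path_py old_path new_path out) := by unfold Spec_format_replaced_path_py; infer_instance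

-- ===== CLAIM (what is proved, stated in full; the proofs are below) =====
def Claim_equal_format_replaced_path_py : Prop := ∀ (old_path : String) (new_path : String), Dom_format_replaced_path_py old_path new_path → Spec_format_replaced_path_py old_path new_path (format_replaced_path_py old_path new_path)

-- ===== LEMMAS AND PROOFS =====

theorem rfindSlashB_ge : ∀ (l : List Char), -1 ≤ rfindSlashB l := by
  intro l; induction l with
  | nil => simp [rfindSlashB]
  | cons a as ih => simp only [rfindSlashB]; split_ifs <;> omega

theorem prefLoopA_eq : ∀ (o n : List Char) (i acc : Nat),
    prefLoopA o n i acc =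
      (if rfindSlashB (o.take (cplB o n)) ≥ 0
       then i + (rfindSlashB (o.take (cplB o n)) + 1).toNat else acc) := by
  intro o
  induction o with
  | nil => intro n i acc; cases n <;> simp [prefLoopA, cplB, rfindSlashB]
  | cons a as ih =>
    intro n i acc
    cases n with
    | nil => simp [prefLoopA, cplB, rfindSlashB]
    | cons b bs =>
      by_cases hab : a = b
      · subst hab
        have hr := rfindSlashB_ge (as.take (cplB as bs))
        rw [show cplB (a::as) (a::bs) = cplB as bs + 1 from by rw [cplB]; rw [if_pos rfl]]
        rw [show prefLoopA (a::as) (a::bs) i acc =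
              prefLoopA as bs (i+1) (if a = '/' then i+1 else acc)
            from by rw [prefLoopA]; rw [if_neg (by simp)]]
        rw [ih, List.take_succ_cons]
        simp only [rfindSlashB]
        by_cases h1 : rfindSlashB (as.take (cplB as bs)) ≥ 0
        · rw [if_pos h1, if_pos h1, if_pos (by omega)]
          omega
        · rw [if_neg h1, if_neg h1]
          by_cases hb : a = '/'
          · rw [if_pos hb, if_pos hb, if_pos (by omega)]; omega
          · rw [if_neg hb, if_neg hb, if_neg (by omega)]
      · simp [prefLoopA, hab, cplB, rfindSlashB]

theorem sufLoopA_eq : ∀ (o n : List Char) (bound toN tnN s : Nat),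
    toN ≤ o.length → tnN ≤ n.length →
    sufLoopA o n bound toN tnN s =
      (let k := min (cplB (o.reverse.drop (o.length - toN)) (n.reverse.drop (n.length - tnN)))
                    (min (toN - bound) (tnN - bound))
       let r := rfindSlashB ((o.reverse.drop (o.length - toN)).take k)
       if r ≥ 0 then (o.length - toN) + (r + 1).toNat else s) := by
  intro o n bound toN
  induction toN with
  | zero =>
    intro tnN s _ _
    simp [sufLoopA, rfindSlashB]
  | succ oi ih =>
    intro tnN s hto htn
    cases tnN with
    | zero => simp [sufLoopA, rfindSlashB]
    | succ ni =>
      have hoi : oi < o.length := by omega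
      have hni : ni < n.length := by omega
      have hp : o.length - (oi+1) < o.reverse.length := by simp; omega
      have hq : n.length - (ni+1) < n.reverse.length := by simp; omega
      have hdo : o.reverse.drop (o.length - (oi+1)) =
          o.getD oi ' ' :: o.reverse.drop (o.length - oi) := by
        rw [List.drop_eq_getElem_cons hp]
        congr 1
        · rw [List.getElem_reverse]
          rw [List.getD_eq_getElem o ' ' hoi]
          congr 1; omega
        · congr 1; omega
      have hdn : n.reverse.drop (n.length - (ni+1)) =
          n.getD ni ' ' :: n.reverse.drop (n.length - ni) := by
        rw [List.drop_eq_getElem_cons hq]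
        congr 1
        · rw [List.getElem_reverse]
          rw [List.getD_eq_getElem n ' ' hni]
          congr 1; omega
        · congr 1; omega
      by_cases hc : bound ≤ oi ∧ bound ≤ ni ∧ o.getD oi ' ' = n.getD ni ' '
      · -- loop takes a step
        rw [show sufLoopA o n bound (oi+1) (ni+1) s =
              sufLoopA o n bound oi ni (if o.getD oi ' ' = '/' then o.length - oi else s)
            from by rw [sufLoopA]; rw [if_pos hc]]
        rw [ih ni _ (by omega) (by omega)]
        simp only [hdo, hdn]
        rw [show cplB (o.getD oi ' ' :: o.reverse.drop (o.length - oi))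
                     (n.getD ni ' ' :: n.reverse.drop (n.length - ni)) =
            cplB (o.reverse.drop (o.length - oi)) (n.reverse.drop (n.length - ni)) + 1
          from by rw [cplB]; rw [if_pos hc.2.2]]
        have hk : min (cplB (o.reverse.drop (o.length - oi)) (n.reverse.drop (n.length - ni)) + 1)
              (min ((oi+1) - bound) ((ni+1) - bound)) =
            min (cplB (o.reverse.drop (o.length - oi)) (n.reverse.drop (n.length - ni)))
              (min (oi - bound) (ni - bound)) + 1 := by omega
        rw [hk]
        simp only [List.take_succ_cons, rfindSlashB]
        set t := (o.reverse.drop (o.length - oi)).take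
          (min (cplB (o.reverse.drop (o.length - oi)) (n.reverse.drop (n.length - ni)))
            (min (oi - bound) (ni - bound))) with ht
        have hr := rfindSlashB_ge t
        by_cases h1 : rfindSlashB t ≥ 0
        · rw [if_pos h1, if_pos h1, if_pos (by omega)]; omega
        · rw [if_neg h1, if_neg h1]
          by_cases hs : o.getD oi ' ' = '/'
          · rw [if_pos hs, if_pos hs, if_pos (by omega)]; omega
          · rw [if_neg hs, if_neg hs, if_neg (by omega)]
      · -- loop stops: k = 0
        rw [show sufLoopA o n bound (oi+1) (ni+1) s = s from by rw [sufLoopA]; rw [if_neg hc]]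
        have hk0 : min (cplB (o.reverse.drop (o.length - (oi+1))) (n.reverse.drop (n.length - (ni+1))))
              (min ((oi+1) - bound) ((ni+1) - bound)) = 0 := by
          by_cases h1 : bound ≤ oi
          · by_cases h2 : bound ≤ ni
            · have h3 : o.getD oi ' ' ≠ n.getD ni ' ' := by
                intro h; exact hc ⟨h1, h2, h⟩
              rw [hdo, hdn]
              rw [show cplB (o.getD oi ' ' :: o.reverse.drop (o.length - oi))
                    (n.getD ni ' ' :: n.reverse.drop (n.length - ni)) = 0
                from by rw [cplB]; rw [if_neg h3]]
              simp
            · omega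
          · omega
        rw [hk0]
        simp [rfindSlashB]

-- ===== VERDICT (by name: the statement is the Claim_ definition above) =====
theorem format_replaced_path_py_spec : Claim_equal_format_replaced_path_py := by
  intro old_path new_path _
  unfold Spec_format_replaced_path_py format_replaced_path_py format_replaced_path_py_alt
  simp only []
  set o := old_path.toList
  set n := new_path.toList
  have hpre : prefLoopA o n 0 0 = (rfindSlashB (o.take (cplB o n)) + 1).toNat := by
    rw [prefLoopA_eq]
    have := rfindSlashB_ge (o.take (cplB o n))
    by_cases h : rfindSlashB (o.take (cplB o n)) ≥ 0
    · rw [if_pos h]; omega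
    · rw [if_neg h]; omega
  rw [hpre]
  have hbound : (rfindSlashB (o.take (cplB o n)) + 1).toNat -
      (if (rfindSlashB (o.take (cplB o n)) + 1).toNat ≠ 0 then 1 else 0) =
      (if (rfindSlashB (o.take (cplB o n)) + 1).toNat ≠ 0
       then (rfindSlashB (o.take (cplB o n)) + 1).toNat - 1 else 0) := by
    split_ifs with h
    · rfl
    · omega
  rw [hbound]
  set bd := (if (rfindSlashB (o.take (cplB o n)) + 1).toNat ≠ 0
       then (rfindSlashB (o.take (cplB o n)) + 1).toNat - 1 else 0)
  have hsuf : sufLoopA o n bd o.length n.length 0 =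
      (rfindSlashB (o.reverse.take (min (cplB o.reverse n.reverse)
        (min (o.length - bd) (n.length - bd)))) + 1).toNat := by
    rw [sufLoopA_eq o n bd o.length n.length 0 le_rfl le_rfl]
    simp only [Nat.sub_self, List.drop_zero]
    have := rfindSlashB_ge (o.reverse.take (min (cplB o.reverse n.reverse)
        (min (o.length - bd) (n.length - bd))))
    by_cases h : rfindSlashB (o.reverse.take (min (cplB o.reverse n.reverse)
        (min (o.length - bd) (n.length - bd)))) ≥ 0
    · rw [if_pos h]; omega
    · rw [if_neg h]; omega
  rw [hsuf]
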